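-- pv_equiv track=rewrite | github.com/arjeetanand/astrology | api/swiss_ephemeris_api.py | house_analysis
-- ===== SOURCE A (Python) =====
-- def house_analysis(positions):
--     """
--     Analyze planetary positions in each of the 12 houses.
--     """
--     # Placeholder logic for calculating which planets are in which house.
--     # A real implementation would require computing the house cusps based on the Ascendant.
--     house_positions = {}
--     for i in range(1, 13):
--         house_positions[f"House {i}"] = []
--
--     # Assuming planets are evenly distributed for this example.
--     for index, (planet, pos) in enumerate(positions.items()):
--         house_number = (index % 12) + 1
--         house_positions[f"House {house_number}"].append(planet)
--
--     return house_positions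
-- ===== SOURCE B (Python) =====
-- def house_analysis(positions):
--     """
--     Analyze planetary positions in each of the 12 houses.
--     """
--     planets = list(positions.keys())
--     house_positions = {}
--     for i in range(1, 13):
--         house_positions[f"House {i}"] = planets[i-1::12]
--     return house_positions
-- ===== Notes on version B (the rewrite author's own statement) =====
-- stated objective: simpler
-- what changed: Instead of pre-creating 12 empty buckets and scattering each planet by enumerate-index modulo 12, B iterates over the 12 houses and gathers each house's planets with one stride slice planets[i-1::12].
import Mathlib
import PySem

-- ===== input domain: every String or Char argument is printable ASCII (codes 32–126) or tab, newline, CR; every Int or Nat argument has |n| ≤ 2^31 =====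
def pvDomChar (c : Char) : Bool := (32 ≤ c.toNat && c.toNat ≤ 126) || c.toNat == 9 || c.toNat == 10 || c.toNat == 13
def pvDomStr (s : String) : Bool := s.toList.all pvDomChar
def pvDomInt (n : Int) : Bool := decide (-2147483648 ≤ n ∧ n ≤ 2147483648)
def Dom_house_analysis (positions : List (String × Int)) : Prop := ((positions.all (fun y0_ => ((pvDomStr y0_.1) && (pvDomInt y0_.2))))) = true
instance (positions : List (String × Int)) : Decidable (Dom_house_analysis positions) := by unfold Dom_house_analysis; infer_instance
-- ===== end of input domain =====

-- B gathers each house's planets with one stride slice planets[i-1::12] instead of scattering each planet by enumerate-index modulo 12 (simpler decomposition, same cost).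


-- ===== PORT A =====
-- f"House {i}"
def pvHouseKey (i : Int) : String := "House " ++ PySem.Int.toStr i

def house_analysis (positions : List (String × Int)) : List (String × List String) :=
  let house_positions : PySem.Dict String (List String) :=
    (PySem.List.pyRange 1 13 1).foldl
      (fun d i => d.insert (pvHouseKey i) ([] : List String)) PySem.Dict.empty
  let house_positions :=
    (PySem.List.enumerate (PySem.Dict.ofList positions).items 0).foldl
      (fun d p => d.modify (pvHouseKey (PySem.Int.mod p.1 12 + 1)) [] (fun l => l ++ [p.2.1]))
      house_positions
  house_positions.items

-- ===== PORT B =====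
def house_analysis_alt (positions : List (String × Int)) : List (String × List String) :=
  let planets := (PySem.Dict.ofList positions).keys
  let house_positions : PySem.Dict String (List String) :=
    (PySem.List.pyRange 1 13 1).foldl
      (fun d i => d.insert (pvHouseKey i)
        ((PySem.List.slice? planets (some (i - 1)) none 12).getD []))
      PySem.Dict.empty
  house_positions.items

-- ===== PRECONDITION & SPEC =====
def Spec_house_analysis (positions : List (String × Int)) (out : List (String × List String)) : Prop := out = house_analysis_alt positions
instance (positions : List (String × Int)) (out : List (String × List String)) : Decidable (Spec_house_analysis positions out) := by unfold Spec_house_analysis; infer_instance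

-- ===== CLAIM (what is proved, stated in full; the proofs are below) =====
def Claim_equal_house_analysis : Prop := ∀ (positions : List (String × Int)), Dom_house_analysis positions → Spec_house_analysis positions (house_analysis positions)

-- ===== LEMMAS AND PROOFS =====

-- every 12th element of a list starting at offset r: the common shape both ports reduce to
def pvGather {α : Type} : List α → Nat → List α
  | [], _ => []
  | x :: ks, 0 => x :: pvGather ks 11
  | _ :: ks, r + 1 => pvGather ks r

theorem pvGather_nil {α : Type} (r : Nat) : pvGather ([] : List α) r = [] := by
  cases r <;> rfl

theorem pvGather_map {α β : Type} (f : α → β) (ks : List α) (r : Nat) :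
    pvGather (ks.map f) r = (pvGather ks r).map f := by
  induction ks generalizing r with
  | nil => simp [pvGather_nil]
  | cons x ks ih => cases r <;> simp [pvGather, ih]

theorem pvGather_eq_nil_of_le {α : Type} (ks : List α) (r : Nat) (h : ks.length ≤ r) :
    pvGather ks r = [] := by
  induction ks generalizing r with
  | nil => exact pvGather_nil r
  | cons x ks ih =>
    cases r with
    | zero => simp at h
    | succ r => exact ih r (by simpa using Nat.le_of_succ_le_succ h)

theorem pvHouseKey_inj (a b : Int) (ha : 1 ≤ a) (ha' : a ≤ 12) (hb : 1 ≤ b) (hb' : b ≤ 12) :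
    pvHouseKey a = pvHouseKey b ↔ a = b := by
  constructor
  · intro h
    interval_cases a <;> interval_cases b <;> first | rfl | (exfalso; revert h; decide)
  · intro h; rw [h]

-- A's scatter loop keeps, for target residue (s+r) % 12, exactly every 12th element from offset r
theorem pvEnumGather {α : Type} (ks : List α) (s r : Nat) (hr : r < 12) :
    ((PySem.List.enumerate ks (s : Int)).filter
        (fun p => PySem.Int.mod p.1 12 == (((s + r) % 12 : Nat) : Int))).map (·.2)
      = pvGather ks r := by
  induction ks generalizing s r with
  | nil => simp [PySem.List.enumerate_nil, pvGather_nil]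
  | cons x ks ih =>
    rw [PySem.List.enumerate_cons]
    have hmod : PySem.Int.mod ((s : Int)) 12 = ((s % 12 : Nat) : Int) := by
      exact_mod_cast PySem.Int.mod_natCast s 12
    have hcast : ((s : Int) + 1) = ((s + 1 : Nat) : Int) := by push_cast; ring
    cases r with
    | zero =>
      have hcond : (PySem.Int.mod ((s : Int)) 12 == (((s + 0) % 12 : Nat) : Int)) = true := by
        simp
      rw [List.filter_cons]
      simp only [hcond, if_true, List.map_cons]
      have hih := ih (s + 1) 11 (by omega)
      rw [show ((s + 1 + 11) % 12 : Nat) = ((s + 0) % 12 : Nat) by omega] at hih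
      rw [hcast, hih]
      rfl
    | succ r =>
      have hcond : (PySem.Int.mod ((s : Int)) 12 == (((s + (r + 1)) % 12 : Nat) : Int)) = false := by
        simp only [hmod, beq_eq_false_iff_ne, ne_eq, Int.natCast_inj]
        omega
      rw [List.filter_cons]
      simp only [hcond, Bool.false_eq_true, if_false]
      have hih := ih (s + 1) r (by omega)
      rw [show ((s + 1 + r) % 12 : Nat) = ((s + (r + 1)) % 12 : Nat) by omega] at hih
      rw [hcast, hih]
      rfl

-- the index arithmetic of a [r::12] stride slice, in Nat form
theorem pvFilterMapGather {α : Type} (ks : List α) (r : Nat) (hr : r < 12) :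
    List.filterMap (fun k => ks[(r + 12 * k : Nat)]?)
        (List.range ((ks.length - r + 11) / 12)) = pvGather ks r := by
  induction ks generalizing r with
  | nil =>
    have h0 : ((([] : List α).length - r + 11) / 12) = 0 := by simp
    rw [h0]; simp [pvGather_nil]
  | cons x ks ih =>
    cases r with
    | zero =>
      have hc : (((x :: ks).length - 0 + 11) / 12) = (ks.length - 11 + 11) / 12 + 1 := by
        simp only [List.length_cons]; omega
      rw [hc, List.range_succ_eq_map,
        List.filterMap_cons_some (f := fun k => (x :: ks)[(0 + 12 * k : Nat)]?) (h := by rfl),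
        List.filterMap_map]
      rw [List.filterMap_congr (by
        intro k _
        show (x :: ks)[(0 + 12 * (k + 1) : Nat)]? = ks[(11 + 12 * k : Nat)]?
        rw [show (0 + 12 * (k + 1)) = (11 + 12 * k) + 1 by omega, List.getElem?_cons_succ])]
      rw [ih 11 (by omega)]
      rfl
    | succ r =>
      have hc : (((x :: ks).length - (r + 1) + 11) / 12) = (ks.length - r + 11) / 12 := by
        simp only [List.length_cons]; omega
      rw [hc]
      rw [List.filterMap_congr (by
        intro k _
        show (x :: ks)[(r + 1 + 12 * k : Nat)]? = ks[(r + 12 * k : Nat)]?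
        rw [show (r + 1 + 12 * k) = (r + 12 * k) + 1 by omega, List.getElem?_cons_succ])]
      exact ih r (by omega)

-- B's stride slice planets[r::12] is exactly every 12th element from offset r
theorem pvSlice_eq_gather {α : Type} (ks : List α) (r : Nat) (hr : r < 12) :
    (PySem.List.slice? ks (some (r : Int)) none 12).getD [] = pvGather ks r := by
  have hr0 : ¬ ((r : Int) < 0) := by omega
  simp only [PySem.List.slice?, PySem.List.sliceIndices]
  norm_num [hr0]
  by_cases h : r < ks.length
  · have hmin : min (r : Int) (ks.length : Int) = (r : Int) := by omega
    rw [hmin, if_pos h]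
    have hcnt : (((ks.length : Int) - (r : Int) + 12 - 1) / 12).toNat = (ks.length - r + 11) / 12 := by
      omega
    rw [hcnt]
    rw [List.filterMap_congr (by
      intro k _
      rw [show ((r : Int) + 12 * (k : Int)).toNat = r + 12 * k by omega])]
    exact pvFilterMapGather ks r hr
  · have hmin : min (r : Int) (ks.length : Int) = (ks.length : Int) := by omega
    rw [hmin, if_neg h]
    simp [pvGather_eq_nil_of_le ks r (by omega)]

-- updating a set with elements it already holds changes nothing
theorem pvSetUpdate_of_subset (xs s : List String) (h : ∀ x ∈ xs, x ∈ s) :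
    PySem.Set.update s xs = s := by
  induction xs generalizing s with
  | nil => rfl
  | cons x xs ih =>
    rw [PySem.Set.update_cons]
    have hadd : PySem.Set.add s x = s := by
      simp [PySem.Set.add, PySem.Set.contains, h x (List.mem_cons_self)]
    rw [hadd]
    exact ih s (fun y hy => h y (List.mem_cons_of_mem x hy))

-- ===== VERDICT (by name: the statement is the Claim_ definition above) =====
theorem house_analysis_spec : Claim_equal_house_analysis := by
  intro positions _
  unfold Spec_house_analysis house_analysis house_analysis_alt
  set items := (PySem.Dict.ofList positions).items with hitemsdef
  set ks := (PySem.Dict.ofList positions).keys with hksdef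
  have hks : ks = items.map (·.1) := rfl
  -- the initial dict of A / the result dict of B, via the fresh-key insert loop
  have hfresh0 : ((PySem.List.pyRange 1 13 1).foldl
      (fun d i => d.insert (pvHouseKey i) ([] : List String)) PySem.Dict.empty).items
      = (PySem.List.pyRange 1 13 1).map (fun i => (pvHouseKey i, ([] : List String))) := by
    exact PySem.Dict.items_foldl_insert_fresh (l := PySem.List.pyRange 1 13 1)
      (k := pvHouseKey) (v := fun _ => ([] : List String)) (d := PySem.Dict.empty)
      (by intro a _; exact PySem.Dict.contains_empty _) (by decide)
  have hfreshB : ((PySem.List.pyRange 1 13 1).foldl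
      (fun d i => d.insert (pvHouseKey i)
        ((PySem.List.slice? ks (some (i - 1)) none 12).getD [])) PySem.Dict.empty).items
      = (PySem.List.pyRange 1 13 1).map
          (fun i => (pvHouseKey i, (PySem.List.slice? ks (some (i - 1)) none 12).getD [])) := by
    exact PySem.Dict.items_foldl_insert_fresh (l := PySem.List.pyRange 1 13 1)
      (k := pvHouseKey) (v := fun i => (PySem.List.slice? ks (some (i - 1)) none 12).getD [])
      (d := PySem.Dict.empty)
      (by intro a _; exact PySem.Dict.contains_empty _) (by decide)
  set d0 : PySem.Dict String (List String) := (PySem.List.pyRange 1 13 1).foldl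
      (fun d i => d.insert (pvHouseKey i) ([] : List String)) PySem.Dict.empty with hd0
  have hd0keys : d0.keys = (PySem.List.pyRange 1 13 1).map pvHouseKey := by
    show d0.items.map (·.1) = _
    rw [hfresh0, List.map_map]
    rfl
  have hd0nodup : d0.keys.Nodup := by rw [hd0keys]; decide
  set dA : PySem.Dict String (List String) := (PySem.List.enumerate items 0).foldl
      (fun d p => d.modify (pvHouseKey (PySem.Int.mod p.1 12 + 1)) [] (fun l => l ++ [p.2.1])) d0
      with hdA
  -- the modify loop leaves the 12 keys unchanged
  have hdAkeys : dA.keys = d0.keys := by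
    rw [hdA, PySem.Dict.keys_foldl_modify_key (PySem.List.enumerate items 0)
      (fun p => pvHouseKey (PySem.Int.mod p.1 12 + 1)) [] (fun _ p => fun l => l ++ [p.2.1]) d0]
    apply pvSetUpdate_of_subset
    intro x hx
    rcases List.mem_map.mp hx with ⟨p, _, hpx⟩
    rw [hd0keys]
    refine List.mem_map.mpr ⟨PySem.Int.mod p.1 12 + 1, ?_, hpx⟩
    refine PySem.List.mem_pyRange_one.mpr ⟨?_, ?_⟩
    · have := PySem.Int.mod_nonneg p.1 (by norm_num : (0:Int) < 12); omega
    · have := PySem.Int.mod_lt p.1 (by norm_num : (0:Int) < 12); omega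
  have hdAnodup : dA.keys.Nodup := by rw [hdAkeys]; exact hd0nodup
  -- goal: dA.items = B's items
  rw [hfreshB, PySem.Dict.items_eq_map_keys dA hdAnodup [], hdAkeys, hd0keys, List.map_map]
  apply List.map_congr_left
  intro i hi
  rcases PySem.List.mem_pyRange_one.mp hi with ⟨hi1, hi2⟩
  simp only [Function.comp]
  refine Prod.ext rfl ?_
  show dA.getD (pvHouseKey i) [] = (PySem.List.slice? ks (some (i - 1)) none 12).getD []
  set r : Nat := (i - 1).toNat with hrdef
  have hri : i - 1 = (r : Int) := by omega
  have hr12 : r < 12 := by omega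
  -- B's bucket
  rw [hri, pvSlice_eq_gather ks r hr12]
  -- A's bucket: reshape as a fold over (key, value) pairs
  have hfold : dA = ((PySem.List.enumerate items 0).map
      (fun p => (pvHouseKey (PySem.Int.mod p.1 12 + 1), p.2.1))).foldl
      (fun d q => d.modify q.1 [] (fun l => l ++ [q.2])) d0 := by
    rw [List.foldl_map]
  rw [hfold, PySem.Dict.getD_foldl_modify_append]
  have hd0get : d0.getD (pvHouseKey i) [] = [] := by
    refine PySem.Dict.getD_of_mem_items d0 ?_ hd0nodup []
    rw [hfresh0]
    exact List.mem_map.mpr ⟨i, hi, rfl⟩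
  rw [hd0get, List.nil_append, List.filter_map]
  have hen := pvEnumGather items 0 r hr12
  simp only [Nat.zero_add, Nat.cast_zero] at hen
  rw [show ((r % 12 : Nat)) = r from by omega] at hen
  have hcond : ∀ p : Int × (String × Int),
      ((fun q => q.1 == pvHouseKey i) ∘ (fun p => (pvHouseKey (PySem.Int.mod p.1 12 + 1), p.2.1))) p
        = (PySem.Int.mod p.1 12 == ((r : Nat) : Int)) := by
    intro p
    have hm0 := PySem.Int.mod_nonneg p.1 (by norm_num : (0:Int) < 12)
    have hm1 := PySem.Int.mod_lt p.1 (by norm_num : (0:Int) < 12)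
    simp only [Function.comp]
    by_cases hm : PySem.Int.mod p.1 12 = i - 1
    · have he : pvHouseKey (PySem.Int.mod p.1 12 + 1) = pvHouseKey i := by
        rw [show PySem.Int.mod p.1 12 + 1 = i by omega]
      rw [beq_iff_eq.mpr he, beq_iff_eq.mpr (by rw [hm, hri])]
    · have hne : pvHouseKey (PySem.Int.mod p.1 12 + 1) ≠ pvHouseKey i := by
        intro hEq
        have := (pvHouseKey_inj _ _ (by omega) (by omega) (by omega) (by omega)).mp hEq
        omega
      have hne2 : PySem.Int.mod p.1 12 ≠ ((r : Nat) : Int) := by rw [← hri]; exact hm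
      rw [beq_eq_false_iff_ne.mpr hne, beq_eq_false_iff_ne.mpr hne2]
  rw [List.filter_congr (fun p _ => hcond p)]
  calc List.map (fun x => x.2)
        (List.map (fun p => (pvHouseKey (PySem.Int.mod p.1 12 + 1), p.2.1))
          ((PySem.List.enumerate items 0).filter (fun p => PySem.Int.mod p.1 12 == ((r : Nat) : Int))))
      = ((PySem.List.enumerate items 0).filter
          (fun p => PySem.Int.mod p.1 12 == ((r : Nat) : Int))).map (fun p => p.2.1) := by
        rw [List.map_map]; rfl
    _ = (((PySem.List.enumerate items 0).filter
          (fun p => PySem.Int.mod p.1 12 == ((r : Nat) : Int))).map (·.2)).map (·.1) := by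
        rw [List.map_map]; rfl
    _ = (pvGather items r).map (·.1) := by rw [hen]
    _ = pvGather ks r := by rw [← pvGather_map, ← hks]
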